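-- pv_equiv track=rewrite | github.com/DoDucNhan/smart-doc-qa | backend/documents/huggingface_service.py | _extract_relevant_text
-- ===== SOURCE A (Python) =====
-- def _extract_relevant_text(question: str, context: str) -> str:
--     """Extract relevant text when QA model confidence is low"""
--     question_words = set(question.lower().split())
--     sentences = context.split('.')
--
--     scored_sentences = []
--     for sentence in sentences:
--         sentence_words = set(sentence.lower().split())
--         overlap = len(question_words.intersection(sentence_words))
--         if overlap > 0:
--             scored_sentences.append((overlap, sentence.strip()))
--
--     if scored_sentences:
--         scored_sentences.sort(reverse=True)
--         best_sentences = [s[1] for s in scored_sentences[:2] if s[1]]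
--         return f"Based on the document: {' '.join(best_sentences)}"
--     else:
--         return "I couldn't find specific information to answer your question in the document."
-- ===== SOURCE B (Python) =====
-- def _extract_relevant_text(question: str, context: str) -> str:
--     """Single pass: keep only the best two scored sentences while scanning, no list + sort."""
--     question_words = set(question.lower().split())
--     top = []  # at most two best (overlap, stripped sentence) pairs, descending tuple order
--     for sentence in context.split('.'):
--         overlap = len(question_words & set(sentence.lower().split()))
--         if overlap > 0:
--             item = (overlap, sentence.strip())
--             if not top:
--                 top = [item]
--             elif top[0] < item:
--                 top = [item, top[0]]
--             elif len(top) == 1 or top[1] < item: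
--                 top = [top[0], item]
--             # else: item is not among the best two so far
--     if not top:
--         return "I couldn't find specific information to answer your question in the document."
--     best = [s for _, s in top if s]
--     return f"Based on the document: {' '.join(best)}"
-- ===== Notes on version B (the rewrite author's own statement) =====
-- stated objective: alternative
-- what changed: Instead of collecting all positive-overlap sentences into a list and sorting it in reverse, B keeps a running top-2 of (overlap, stripped sentence) pairs during a single pass using full-tuple comparison, so no scored list is built and no sort is performed.
import Mathlib
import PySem

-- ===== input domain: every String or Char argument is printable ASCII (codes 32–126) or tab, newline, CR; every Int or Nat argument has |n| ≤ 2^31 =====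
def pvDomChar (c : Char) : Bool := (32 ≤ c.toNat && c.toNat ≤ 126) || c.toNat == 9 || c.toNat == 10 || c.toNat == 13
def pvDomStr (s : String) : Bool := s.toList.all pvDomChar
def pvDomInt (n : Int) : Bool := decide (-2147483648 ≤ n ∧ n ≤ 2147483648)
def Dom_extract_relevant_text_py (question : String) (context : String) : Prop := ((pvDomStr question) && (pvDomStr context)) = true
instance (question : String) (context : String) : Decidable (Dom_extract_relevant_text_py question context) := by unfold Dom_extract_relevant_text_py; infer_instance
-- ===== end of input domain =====

-- B replaces A's build-list-then-sort by a single pass keeping only the two best (overlap, sentence) pairs; same output (objective: alternative/simpler selection).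

-- ===== PORT A =====
def extract_relevant_text_py (question : String) (context : String) : String :=
  let question_words : PySem.Set String := PySem.Set.ofList (PySem.Str.split₀ (PySem.Str.lower question))
  -- sep "." is non-empty, so split? is always `some`; getD [] only totalizes
  let sentences : List String := (PySem.Str.split? context ".").getD []
  let scored : List (Int × String) := sentences.foldl (fun acc sentence =>
      let overlap : Int := PySem.Set.len (PySem.Set.inter question_words
        (PySem.Set.ofList (PySem.Str.split₀ (PySem.Str.lower sentence))))
      if overlap > 0 then acc ++ [(overlap, PySem.Str.strip sentence)] else acc) []
  if scored.isEmpty then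
    "I couldn't find specific information to answer your question in the document."
  else
    let sortedS := PySem.List.sorted2 scored (fun s => s.1) (fun s => s.2) true
    let best := ((sortedS.take 2).filter (fun s => !(s.2 == ""))).map (fun s => s.2)
    "Based on the document: " ++ PySem.Str.join " " best

-- ===== PORT B =====
-- Python tuple comparison (o1, s1) < (o2, s2), as in Source B's `top[0] < item`
def pyTupLt (a b : Int × String) : Bool :=
  decide (a.1 < b.1) || (!decide (b.1 < a.1) && decide (a.2 < b.2))

-- Source B's in-place update of the running top-2 list (descending tuple order)
def pyPush2 (top : List (Int × String)) (item : Int × String) : List (Int × String) :=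
  match top with
  | [] => [item]
  | [a] => if pyTupLt a item then [item, a] else [a, item]
  | a :: b :: _ =>
    if pyTupLt a item then [item, a]
    else if pyTupLt b item then [a, item]
    else top

def extract_relevant_text_py_alt (question : String) (context : String) : String :=
  let question_words : PySem.Set String := PySem.Set.ofList (PySem.Str.split₀ (PySem.Str.lower question))
  -- sep "." is non-empty, so split? is always `some`; getD [] only totalizes
  let top : List (Int × String) := ((PySem.Str.split? context ".").getD []).foldl (fun top sentence =>
      let overlap : Int := PySem.Set.len (PySem.Set.inter question_words
        (PySem.Set.ofList (PySem.Str.split₀ (PySem.Str.lower sentence))))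
      if overlap > 0 then pyPush2 top (overlap, PySem.Str.strip sentence) else top) []
  if top.isEmpty then
    "I couldn't find specific information to answer your question in the document."
  else
    "Based on the document: " ++
      PySem.Str.join " " ((top.filter (fun s => !(s.2 == ""))).map (fun s => s.2))

-- ===== PRECONDITION & SPEC =====
def Spec_extract_relevant_text_py (question : String) (context : String) (out : String) : Prop := out = extract_relevant_text_py_alt question context
instance (question : String) (context : String) (out : String) : Decidable (Spec_extract_relevant_text_py question context out) := by unfold Spec_extract_relevant_text_py; infer_instance

-- ===== CLAIM (what is proved, stated in full; the proofs are below) =====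
def Claim_equal_extract_relevant_text_py : Prop := ∀ (question : String) (context : String), Dom_extract_relevant_text_py question context → Spec_extract_relevant_text_py question context (extract_relevant_text_py question context)

-- ===== LEMMAS AND PROOFS =====

theorem pyPush2_ne_nil (top : List (Int × String)) (item : Int × String) :
    pyPush2 top item ≠ [] := by
  rcases top with _ | ⟨a, _ | ⟨b, r⟩⟩ <;> simp only [pyPush2] <;> (try split_ifs) <;> simp

theorem foldl_pyPush2_eq_nil_iff (ys : List (Int × String)) (acc : List (Int × String)) :
    ys.foldl pyPush2 acc = [] ↔ ys = [] ∧ acc = [] := by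
  induction ys generalizing acc with
  | nil => simp
  | cons y t ih =>
    simp only [List.foldl_cons, ih]
    simp [pyPush2_ne_nil acc y]

theorem take2_insertBy (x : Int × String) (acc : List (Int × String)) :
    (PySem.List.insertBy (fun a b => pyTupLt b a) x acc).take 2 = pyPush2 (acc.take 2) x := by
  cases acc with
  | nil => simp [PySem.List.insertBy, pyPush2]
  | cons a t =>
    cases t with
    | nil =>
      simp only [PySem.List.insertBy, pyPush2, List.take]
      split <;> simp
    | cons b r =>
      simp only [PySem.List.insertBy, pyPush2, List.take]
      split_ifs <;> simp_all

theorem take2_foldl_insertBy (ys : List (Int × String)) (acc : List (Int × String)) :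
    (ys.foldl (fun acc x => PySem.List.insertBy (fun a b => pyTupLt b a) x acc) acc).take 2
      = ys.foldl pyPush2 (acc.take 2) := by
  induction ys generalizing acc with
  | nil => rfl
  | cons y t ih => rw [List.foldl_cons, List.foldl_cons, ih, take2_insertBy]

theorem take2_sorted2 (ys : List (Int × String)) :
    (PySem.List.sorted2 ys (fun s => s.1) (fun s => s.2) true).take 2 = ys.foldl pyPush2 [] := by
  have h : PySem.List.sorted2 ys (fun s => s.1) (fun s => s.2) true
      = ys.foldl (fun acc x => PySem.List.insertBy (fun a b => pyTupLt b a) x acc) [] := rfl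
  rw [h, take2_foldl_insertBy]
  rfl

theorem extract_relevant_text_py_eq (question : String) (context : String) :
    extract_relevant_text_py question context = extract_relevant_text_py_alt question context := by
  unfold extract_relevant_text_py extract_relevant_text_py_alt
  simp only []
  set qw : PySem.Set String := PySem.Set.ofList (PySem.Str.split₀ (PySem.Str.lower question)) with hqw
  set sentences : List String := (PySem.Str.split? context ".").getD [] with hs
  set ov : String → Int := fun sentence => PySem.Set.len (PySem.Set.inter qw
      (PySem.Set.ofList (PySem.Str.split₀ (PySem.Str.lower sentence)))) with hov
  set f : String → Int × String := fun sentence => (ov sentence, PySem.Str.strip sentence) with hf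
  have hA : sentences.foldl (fun acc sentence =>
      if ov sentence > 0 then acc ++ [f sentence] else acc) ([] : List (Int × String))
      = (sentences.filter (fun s => decide (ov s > 0))).map f := by
    rw [PySem.List.foldl_append_ite (p := fun s => ov s > 0) (f := f)]
    simp
  have hB : sentences.foldl (fun top sentence =>
      if ov sentence > 0 then pyPush2 top (f sentence) else top) ([] : List (Int × String))
      = ((sentences.filter (fun s => decide (ov s > 0))).map f).foldl pyPush2 [] := by
    rw [PySem.List.foldl_ite_eq_foldl_filter (p := fun s => ov s > 0)
      (f := fun top s => pyPush2 top (f s)), List.foldl_map]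
  rw [hA, hB]
  set scored := (sentences.filter (fun s => decide (ov s > 0))).map f with hscored
  rw [← take2_sorted2]
  by_cases hnil : scored = []
  · simp [hnil, PySem.List.sorted2]
  · have h1 : scored.isEmpty = false := by simp [hnil]
    have h2 : (PySem.List.sorted2 scored (fun s => s.1) (fun s => s.2) true).take 2 ≠ [] := by
      rw [take2_sorted2]
      simp [foldl_pyPush2_eq_nil_iff, hnil]
    have h3 : ((PySem.List.sorted2 scored (fun s => s.1) (fun s => s.2) true).take 2).isEmpty = false := by
      simp [h2]
    rw [h1, h3]

-- ===== VERDICT (by name: the statement is the Claim_ definition above) =====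
theorem extract_relevant_text_py_spec : Claim_equal_extract_relevant_text_py := by
  intro question context _
  unfold Spec_extract_relevant_text_py
  exact extract_relevant_text_py_eq question context
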